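-- pv_equiv track=rewrite | github.com/JasonTam4/UWO | CompSci_3357/Asn1/testing.py | solution
-- ===== SOURCE A (Python) =====
-- def solution(E):
--     # Implement your solution here
--     max_attendance = 0
--     days = range(10)  # Days are represented as 0 to 9
--
--     # Check all combinations of two days
--     for day1 in days:
--         for day2 in days:
--             if day1 != day2:  # Ensure we are checking two different days
--                 attendance = 0
--                 for employee in E:
--                     # Check if the employee is available on either day
--                     if str(day1) in employee or str(day2) in employee:
--                         attendance += 1
--                 max_attendance = max(max_attendance, attendance)
--
--     return max_attendance
-- ===== SOURCE B (Python) =====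
-- def solution(E):
--     # One pass: per-day and per-pair availability counts, then union by inclusion-exclusion.
--     cnt = {}
--     pair = {}
--     for e in E:
--         present = [d for d in range(10) if str(d) in e]
--         for d in present:
--             cnt[d] = cnt.get(d, 0) + 1
--         for d1 in present:
--             for d2 in present:
--                 pair[(d1, d2)] = pair.get((d1, d2), 0) + 1
--     best = 0
--     for d1 in range(10):
--         for d2 in range(10):
--             if d1 != d2:
--                 best = max(best, cnt.get(d1, 0) + cnt.get(d2, 0) - pair.get((d1, d2), 0))
--     return best
-- ===== Notes on version B (the rewrite author's own statement) =====
-- stated objective: faster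
-- what changed: B scans each employee string once to collect its available digits, builds per-day and per-pair counters in a single pass, and computes each pair's union attendance by inclusion-exclusion, instead of A's re-scan of every employee for each of the 90 day pairs.
import Mathlib
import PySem

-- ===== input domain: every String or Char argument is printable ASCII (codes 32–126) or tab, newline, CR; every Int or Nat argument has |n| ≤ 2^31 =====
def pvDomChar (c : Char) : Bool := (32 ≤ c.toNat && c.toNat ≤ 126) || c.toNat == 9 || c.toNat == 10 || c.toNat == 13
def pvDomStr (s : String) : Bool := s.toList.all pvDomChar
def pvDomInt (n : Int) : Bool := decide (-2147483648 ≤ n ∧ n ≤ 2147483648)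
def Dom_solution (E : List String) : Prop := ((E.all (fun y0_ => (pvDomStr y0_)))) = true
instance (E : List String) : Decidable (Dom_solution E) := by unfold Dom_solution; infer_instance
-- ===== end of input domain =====

-- B replaces A's per-pair rescan of all employee strings with one pass building per-day and
-- per-pair counters, combining each pair by inclusion-exclusion (objective: faster, constant factor).

-- ===== PORT A =====
-- for day1 in range(10): for day2 in range(10): if day1 != day2: count employees with str(day1) or str(day2) in them
def solution (E : List String) : Int :=
  (PySem.List.pyRange 0 10 1).foldl (fun max_attendance day1 =>
    (PySem.List.pyRange 0 10 1).foldl (fun max_attendance day2 =>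
      if day1 ≠ day2 then
        max max_attendance
          (E.foldl (fun attendance employee =>
            if PySem.Str.isIn (PySem.Int.toStr day1) employee
               || PySem.Str.isIn (PySem.Int.toStr day2) employee
            then attendance + 1 else attendance) 0)
      else max_attendance) max_attendance) 0

-- ===== PORT B =====
-- present = [d for d in range(10) if str(d) in e]
def digitsOf (e : String) : List Int :=
  (PySem.List.pyRange 0 10 1).filter (fun d => PySem.Str.isIn (PySem.Int.toStr d) e)

def solution_alt (E : List String) : Int :=
  let st := E.foldl
    (fun (st : PySem.Dict Int Int × PySem.Dict (Int × Int) Int) e =>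
      let present := digitsOf e
      (present.foldl (fun c d => c.modify d 0 (· + 1)) st.1,
       present.foldl (fun p d1 =>
         present.foldl (fun p d2 => p.modify (d1, d2) 0 (· + 1)) p) st.2))
    (PySem.Dict.empty, PySem.Dict.empty)
  (PySem.List.pyRange 0 10 1).foldl (fun best d1 =>
    (PySem.List.pyRange 0 10 1).foldl (fun best d2 =>
      if d1 ≠ d2 then
        max best (st.1.getD d1 0 + st.1.getD d2 0 - st.2.getD (d1, d2) 0)
      else best) best) 0

-- ===== PRECONDITION & SPEC =====
def Spec_solution (E : List String) (out : Int) : Prop := out = solution_alt E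
instance (E : List String) (out : Int) : Decidable (Spec_solution E out) := by unfold Spec_solution; infer_instance

-- ===== CLAIM (what is proved, stated in full; the proofs are below) =====
def Claim_equal_solution : Prop := ∀ (E : List String), Dom_solution E → Spec_solution E (solution E)

-- ===== LEMMAS AND PROOFS =====

-- proof-side names for the two accumulated counter dictionaries of solution_alt
def cntFold (E : List String) : PySem.Dict Int Int :=
  E.foldl (fun c e => (digitsOf e).foldl (fun c d => c.modify d 0 (· + 1)) c) PySem.Dict.empty

def pairFold (E : List String) : PySem.Dict (Int × Int) Int :=
  E.foldl (fun p e =>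
    (digitsOf e).foldl (fun p d1 =>
      (digitsOf e).foldl (fun p d2 => p.modify (d1, d2) 0 (· + 1)) p) p) PySem.Dict.empty

theorem nodup_digitsOf (e : String) : (digitsOf e).Nodup :=
  List.Nodup.filter _ (by decide : (PySem.List.pyRange 0 10 1).Nodup)

theorem mem_digitsOf {d : Int} {e : String}
    (hd : d ∈ PySem.List.pyRange 0 10 1) :
    (d ∈ digitsOf e) ↔ PySem.Str.isIn (PySem.Int.toStr d) e = true := by
  simp [digitsOf, List.mem_filter, hd]

-- counting occurrences across a flatMap of nodup blocks is counting the blocks containing v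
theorem count_flatMap_nodup {α β : Type} [BEq α] [LawfulBEq α] [DecidableEq α]
    (E : List β) (f : β → List α) (v : α) (hnd : ∀ e, (f e).Nodup) :
    (E.flatMap f).count v = E.countP (fun e => decide (v ∈ f e)) := by
  induction E with
  | nil => simp
  | cons e E ih =>
    simp only [List.flatMap_cons, List.count_append, List.countP_cons, ih]
    by_cases hv : v ∈ f e
    · rw [List.count_eq_one_of_mem (hnd e) hv]; simp [hv]; omega
    · rw [List.count_eq_zero_of_not_mem hv]; simp [hv]

theorem cntFold_getD (E : List String) (d : Int) :
    (cntFold E).getD d 0 = (E.countP (fun e => decide (d ∈ digitsOf e)) : Int) := by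
  unfold cntFold
  rw [← List.foldl_flatMap, PySem.Dict.getD_foldl_modify_add_one,
      PySem.Dict.getD_empty, count_flatMap_nodup E digitsOf d (fun e => nodup_digitsOf e)]
  simp

theorem pairFold_getD (E : List String) (d1 d2 : Int) :
    (pairFold E).getD (d1, d2) 0
      = (E.countP (fun e => decide (d1 ∈ digitsOf e) && decide (d2 ∈ digitsOf e)) : Int) := by
  unfold pairFold
  have hpr : ∀ (e : String) (p : PySem.Dict (Int × Int) Int),
      (digitsOf e).foldl (fun p d1 =>
        (digitsOf e).foldl (fun p d2 => p.modify (d1, d2) 0 (· + 1)) p) p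
      = ((digitsOf e) ×ˢ (digitsOf e)).foldl (fun p pr => p.modify pr 0 (· + 1)) p := by
    intro e p
    simp only [SProd.sprod, List.product, List.foldl_flatMap, List.foldl_map]
  simp only [hpr]
  rw [← List.foldl_flatMap, PySem.Dict.getD_foldl_modify_add_one, PySem.Dict.getD_empty,
      count_flatMap_nodup E (fun e => (digitsOf e) ×ˢ (digitsOf e)) (d1, d2)
        (fun e => List.Nodup.product (nodup_digitsOf e) (nodup_digitsOf e))]
  simp only [zero_add, Nat.cast_inj]
  exact List.countP_congr (fun e _ => by
    simp [SProd.sprod, List.pair_mem_product])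

-- inclusion-exclusion on countP, over Int
theorem countP_or_int {α : Type} (l : List α) (p q : α → Bool) :
    (l.countP (fun x => p x || q x) : Int)
      = (l.countP p : Int) + (l.countP q : Int) - (l.countP (fun x => p x && q x) : Int) := by
  induction l with
  | nil => simp
  | cons x l ih =>
    simp only [List.countP_cons]
    cases hp : p x <;> cases hq : q x <;> push_cast <;> simp <;> omega

-- the per-pair value A computes equals B's inclusion-exclusion expression
theorem pairVal (E : List String) (d1 d2 : Int)
    (h1 : d1 ∈ PySem.List.pyRange 0 10 1) (h2 : d2 ∈ PySem.List.pyRange 0 10 1) :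
    E.foldl (fun attendance employee =>
        if PySem.Str.isIn (PySem.Int.toStr d1) employee
           || PySem.Str.isIn (PySem.Int.toStr d2) employee
        then attendance + 1 else attendance) 0
      = (cntFold E).getD d1 0 + (cntFold E).getD d2 0 - (pairFold E).getD (d1, d2) 0 := by
  rw [PySem.List.foldl_ite_add_one
        (fun employee => (PySem.Str.isIn (PySem.Int.toStr d1) employee
           || PySem.Str.isIn (PySem.Int.toStr d2) employee) = true) E 0,
      cntFold_getD, cntFold_getD, pairFold_getD]
  rw [show (E.countP fun x =>
        decide ((PySem.Str.isIn (PySem.Int.toStr d1) x || PySem.Str.isIn (PySem.Int.toStr d2) x) = true))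
      = E.countP (fun x => decide (d1 ∈ digitsOf x) || decide (d2 ∈ digitsOf x)) from
    List.countP_congr (fun e _ => by
      simp [mem_digitsOf h1, mem_digitsOf h2])]
  rw [zero_add, countP_or_int]

-- ===== VERDICT (by name: the statement is the Claim_ definition above) =====
theorem alt_eq (E : List String) : solution_alt E =
    (PySem.List.pyRange 0 10 1).foldl (fun best d1 =>
      (PySem.List.pyRange 0 10 1).foldl (fun best d2 =>
        if d1 ≠ d2 then
          max best ((cntFold E).getD d1 0 + (cntFold E).getD d2 0 - (pairFold E).getD (d1, d2) 0)
        else best) best) 0 := by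
  have h : E.foldl
      (fun (st : PySem.Dict Int Int × PySem.Dict (Int × Int) Int) e =>
        ((digitsOf e).foldl (fun c d => c.modify d 0 (· + 1)) st.1,
         (digitsOf e).foldl (fun p d1 =>
           (digitsOf e).foldl (fun p d2 => p.modify (d1, d2) 0 (· + 1)) p) st.2))
      (PySem.Dict.empty, PySem.Dict.empty) = (cntFold E, pairFold E) := by
    rw [PySem.List.foldl_prod_mk
        (f := fun (c : PySem.Dict Int Int) (e : String) => (digitsOf e).foldl (fun c d => c.modify d 0 (· + 1)) c)
        (g := fun (p : PySem.Dict (Int × Int) Int) (e : String) => (digitsOf e).foldl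
          (fun (p : PySem.Dict (Int × Int) Int) d1 =>
            (digitsOf e).foldl (fun p d2 => p.modify (d1, d2) 0 (· + 1)) p) p)]
    rfl
  unfold solution_alt
  rw [h]

theorem solution_spec : Claim_equal_solution := by
  intro E _
  unfold Spec_solution solution
  rw [alt_eq]
  refine PySem.List.foldl_congr_mem _ _ _ _ (fun acc d1 h1 => ?_)
  refine PySem.List.foldl_congr_mem _ _ _ _ (fun acc2 d2 h2 => ?_)
  by_cases h : d1 ≠ d2
  · simp only [if_pos h]
    rw [pairVal E d1 d2 h1 h2]
  · simp only [if_neg h]
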